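-- pv_equiv track=rewrite | github.com/MaximilianLimmer/matrix_verification_correction | correction_algorithmica.py | is_error_isolated
-- ===== SOURCE A (Python) =====
-- def is_error_isolated(indices, primes):
--     """
--     Check if each error index is isolated from all others for at least one prime.
--     """
--     for im in indices:
--         isolated = False
--         for p in primes:
--             mod_im = im % p
--             conflict = False
--             for iq in indices:
--                 if iq != im and iq % p == mod_im:
--                     conflict = True
--                     break
--             if not conflict:
--                 # This prime isolates im
--                 isolated = True
--                 break
--         if not isolated:
--             # No prime isolates im
--             return False
--     return True
-- ===== SOURCE B (Python) =====
-- def is_error_isolated(indices, primes):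
--     # Per prime, build a residue-count histogram over the distinct indices once;
--     # an index is isolated by that prime iff its residue count is 1. Keep only the
--     # not-yet-isolated indices and stop as soon as none remain.
--     distinct = list(dict.fromkeys(indices))
--     remaining = distinct
--     for p in primes:
--         if not remaining:
--             break
--         cnt = {}
--         for i in distinct:
--             r = i % p
--             cnt[r] = cnt.get(r, 0) + 1
--         remaining = [i for i in remaining if cnt[i % p] != 1]
--     return not remaining
-- ===== Notes on version B (the rewrite author's own statement) =====
-- stated objective: faster
-- what changed: Instead of scanning all indices for a conflict for every (index, prime) pair, B deduplicates the indices once, builds per prime a residue-count histogram over the distinct indices (isolated iff count 1), keeps only not-yet-isolated indices and stops once all are isolated.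
-- outside the precondition, e.g. on is_error_isolated([1], [2, 0]): A returns True, B returns True
import Mathlib
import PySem

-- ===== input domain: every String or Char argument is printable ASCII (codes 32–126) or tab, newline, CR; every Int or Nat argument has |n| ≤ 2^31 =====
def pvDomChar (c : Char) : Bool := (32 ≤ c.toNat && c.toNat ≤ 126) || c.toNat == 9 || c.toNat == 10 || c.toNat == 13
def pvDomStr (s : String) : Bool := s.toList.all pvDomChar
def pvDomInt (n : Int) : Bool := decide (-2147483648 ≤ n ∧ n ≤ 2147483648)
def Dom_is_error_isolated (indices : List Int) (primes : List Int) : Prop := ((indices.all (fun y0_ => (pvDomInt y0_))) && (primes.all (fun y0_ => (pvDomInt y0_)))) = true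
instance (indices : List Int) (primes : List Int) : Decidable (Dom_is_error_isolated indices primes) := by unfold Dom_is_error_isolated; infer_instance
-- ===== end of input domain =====

-- B replaces A's per-(index, prime) conflict scan by one per-prime residue-count histogram
-- over the distinct indices, dropping isolated indices as it goes (measured faster).

-- ===== PORT A =====
-- A: for each im, try each prime; a prime isolates im when no other index shares im's residue.
def is_error_isolated (indices : List Int) (primes : List Int) : Bool :=
  indices.all (fun im =>
    primes.any (fun p =>
      let mod_im := PySem.Int.mod im p
      !(indices.any (fun iq => iq != im && PySem.Int.mod iq p == mod_im))))

-- ===== PORT B =====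
-- the 'for p in primes' loop of B: state = remaining; breaks when remaining is empty
def altLoop (distinct : List Int) (remaining : List Int) : List Int → List Int
  | [] => remaining
  | p :: ps =>
    if remaining.isEmpty then remaining
    else
      let cnt := PySem.Dict.counter (distinct.map (fun i => PySem.Int.mod i p))
      altLoop distinct (remaining.filter (fun i => cnt.getD (PySem.Int.mod i p) 0 != 1)) ps

-- B: distinct = list(dict.fromkeys(indices)); per prime a residue-count dict over distinct;
-- keep only not-yet-isolated indices, stop when none remain; result = 'not remaining'.
def is_error_isolated_alt (indices : List Int) (primes : List Int) : Bool :=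
  let distinct := PySem.List.dedup indices
  (altLoop distinct distinct primes).isEmpty

-- ===== PRECONDITION & SPEC =====
-- Pre_ excludes inputs pairing a nonempty indices list with a 0 in primes: Python's '%'
-- raises ZeroDivisionError when the 0 is reached (both A and B may still return when every
-- index is isolated by primes before the 0 — see cites; the exclusion is the simple superset).
def Pre_is_error_isolated (indices : List Int) (primes : List Int) : Prop :=
  indices = [] ∨ (0 : Int) ∉ primes
instance (indices : List Int) (primes : List Int) : Decidable (Pre_is_error_isolated indices primes) := by unfold Pre_is_error_isolated; infer_instance

def pvWitness_is_error_isolated : List Int × List Int := ([3, 5, 8], [2, 3])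

def Spec_is_error_isolated (indices : List Int) (primes : List Int) (out : Bool) : Prop := out = is_error_isolated_alt indices primes
instance (indices : List Int) (primes : List Int) (out : Bool) : Decidable (Spec_is_error_isolated indices primes out) := by unfold Spec_is_error_isolated; infer_instance

-- ===== CLAIM (what is proved, stated in full; the proofs are below) =====
def Claim_equal_is_error_isolated : Prop := ∀ (indices : List Int) (primes : List Int), Dom_is_error_isolated indices primes → Pre_is_error_isolated indices primes → Spec_is_error_isolated indices primes (is_error_isolated indices primes)

-- ===== LEMMAS AND PROOFS =====

-- For im ∈ l with l nodup: exactly one element of l has f-image f im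
-- iff im is the only element of l with that f-image.
theorem countP_eq_one_iff (l : List Int) (hnd : l.Nodup) (im : Int) (him : im ∈ l)
    (f : Int → Int) :
    l.countP (fun x => f x == f im) = 1 ↔ ∀ x ∈ l, f x = f im → x = im := by
  rw [List.countP_eq_length_filter, List.length_eq_one_iff]
  constructor
  · rintro ⟨a, ha⟩ x hx hfx
    have hxmem : x ∈ l.filter (fun x => f x == f im) := by
      simp [List.mem_filter, hx, hfx]
    have himmem : im ∈ l.filter (fun x => f x == f im) := by
      simp [List.mem_filter, him]
    rw [ha] at hxmem himmem
    simp at hxmem himmem; rw [hxmem, himmem]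
  · intro h
    refine ⟨im, ?_⟩
    have h1 : ∀ x ∈ l.filter (fun x => f x == f im), x = im := by
      intro x hx
      rw [List.mem_filter] at hx
      exact h x hx.1 (by simpa using hx.2)
    have h2 : im ∈ l.filter (fun x => f x == f im) := by simp [List.mem_filter, him]
    have h3 : (l.filter (fun x => f x == f im)).Nodup := hnd.filter _
    cases hf : l.filter (fun x => f x == f im) with
    | nil => rw [hf] at h2; simp at h2
    | cons a t =>
      rw [hf] at h1 h3
      have ha : a = im := h1 a (by simp)
      cases t with
      | nil => simp [ha]
      | cons b t' =>
        have hb : b = im := h1 b (by simp)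
        exfalso
        simp [ha, hb] at h3

-- B's prime loop filters remaining by 'no processed prime gives this index residue count 1'.
theorem altLoop_eq (distinct : List Int) (ps : List Int) (r : List Int) :
    altLoop distinct r ps = r.filter (fun i => ps.all (fun p =>
      (PySem.Dict.counter (distinct.map (fun x => PySem.Int.mod x p))).getD
        (PySem.Int.mod i p) 0 != 1)) := by
  induction ps generalizing r with
  | nil => simp [altLoop]
  | cons p ps ih =>
    rw [altLoop]
    by_cases hr : r.isEmpty
    · simp_all [List.isEmpty_iff]
    · rw [if_neg hr, ih, List.filter_filter]
      simp [Bool.and_comm]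

-- A = B on every input: both compute "every index has a prime whose residue class
-- (over the distinct indices) contains it alone".
theorem ports_agree (indices primes : List Int) :
    is_error_isolated indices primes = is_error_isolated_alt indices primes := by
  rw [Bool.eq_iff_iff]
  rw [is_error_isolated_alt]
  simp only [altLoop_eq, List.isEmpty_iff, List.filter_eq_nil_iff]
  simp only [is_error_isolated, List.all_eq_true, List.any_eq_true,
    Bool.not_eq_true', List.any_eq_false,
    Bool.and_eq_true, bne_iff_ne, ne_eq, beq_iff_eq, not_and,
    PySem.Dict.getD_counter, PySem.List.mem_dedup, List.count_eq_countP,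
    List.countP_map, not_forall, Decidable.not_not]
  refine forall₂_congr (fun im him => exists_congr (fun p => ?_))
  rw [exists_prop]
  refine and_congr_right (fun hp => ?_)
  have hkey := countP_eq_one_iff (PySem.List.dedup indices) (PySem.List.nodup_dedup _)
    im ((PySem.List.mem_dedup _ _).mpr him) (fun x => PySem.Int.mod x p)
  constructor
  · intro hno
    have : ∀ x ∈ PySem.List.dedup indices, PySem.Int.mod x p = PySem.Int.mod im p → x = im := by
      intro x hx hfx
      by_contra hne
      exact (hno x ((PySem.List.mem_dedup _ _).mp hx) hne) hfx
    have h1 := hkey.mpr this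
    exact_mod_cast h1
  · intro hcnt
    have h1 : (PySem.List.dedup indices).countP
        (fun x => PySem.Int.mod x p == PySem.Int.mod im p) = 1 := by exact_mod_cast hcnt
    intro x hx hne hfx
    exact hne (hkey.mp h1 x ((PySem.List.mem_dedup _ _).mpr hx) hfx)

-- ===== VERDICT (by name: the statement is the Claim_ definition above) =====
theorem is_error_isolated_spec : Claim_equal_is_error_isolated := by
  intro indices primes _ _
  exact ports_agree indices primes
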